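-- pv_equiv track=rewrite | github.com/gabrielbessler/ProgrammingCompetition | WC33_1.py | twin_arrays
-- ===== SOURCE A (Python) =====
-- def twin_arrays(ar1, ar2):
--     '''
--     Finds an integer in ar1 and ar2 such that their sum is minimum,
--     and their indeces are different.
--     '''
--     # Store smaller of two starting values with index in ar1MinVal for array 1
--     if ar1[0] < ar1[1]:
--         ar1_min_val = [ar1[0], 0]
--         ar1_min_val2 = [ar1[1], 1]
--     else:
--         ar1_min_val = [ar1[1], 1]
--         ar1_min_val2 = [ar1[0], 0]
--
--     # Do the same for array 2
--     if ar2[0] < ar2[1]: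
--         ar2_min_val = [ar2[0], 0]
--         ar2_min_val2 = [ar2[1], 1]
--     else:
--         ar2_min_val = [ar2[1], 1]
--         ar2_min_val2 = [ar2[0], 0]
--
--     # Loop through array one in order to find its minimum value w/ index,
--     # and the 2nd to smallest value w/ index
--     for i in range(2, len(ar1)):
--         if ar1[i] < ar1_min_val[0]:
--             ar1_min_val2 = ar1_min_val
--             ar1_min_val = [ar1[i], i]
--         elif ar1[i] < ar1_min_val2[0]:
--             ar1_min_val2 = [ar1[i], i]
--
--     # Do the same with array 2
--     for i in range(2, len(ar2)):
--         if ar2[i] < ar2_min_val[0]: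
--             ar2_min_val2 = ar2_min_val
--             ar2_min_val = [ar2[i], i]
--         elif ar2[i] < ar2_min_val2[0]:
--             ar2_min_val2 = [ar2[i], i]
--
--     if ar1_min_val[1] == ar2_min_val[1]:
--         sum1 = ar1_min_val2[0] + ar2_min_val[0]
--         sum2 = ar1_min_val[0] + ar2_min_val2[0]
--         return min(sum1, sum2)
--     else:
--         return ar1_min_val[0] + ar2_min_val[0]
-- ===== SOURCE B (Python) =====
-- def twin_arrays(ar1, ar2):
--     '''
--     Finds an integer in ar1 and ar2 such that their sum is minimum,
--     and their indeces are different.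
--     '''
--     order1 = sorted(range(len(ar1)), key=lambda i: ar1[i])
--     order2 = sorted(range(len(ar2)), key=lambda j: ar2[j])
--     i1, i2 = order1[0], order2[0]
--     if i1 != i2:
--         return ar1[i1] + ar2[i2]
--     return min(ar1[order1[1]] + ar2[i2], ar1[i1] + ar2[order2[1]])
-- ===== Notes on version B (the rewrite author's own statement) =====
-- stated objective: simpler
-- what changed: Replaces A's two hand-rolled min/second-min scans with explicit [value,index] state by sorting each array's indices by value and reading the two smallest entries off each sorted order.
import Mathlib
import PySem

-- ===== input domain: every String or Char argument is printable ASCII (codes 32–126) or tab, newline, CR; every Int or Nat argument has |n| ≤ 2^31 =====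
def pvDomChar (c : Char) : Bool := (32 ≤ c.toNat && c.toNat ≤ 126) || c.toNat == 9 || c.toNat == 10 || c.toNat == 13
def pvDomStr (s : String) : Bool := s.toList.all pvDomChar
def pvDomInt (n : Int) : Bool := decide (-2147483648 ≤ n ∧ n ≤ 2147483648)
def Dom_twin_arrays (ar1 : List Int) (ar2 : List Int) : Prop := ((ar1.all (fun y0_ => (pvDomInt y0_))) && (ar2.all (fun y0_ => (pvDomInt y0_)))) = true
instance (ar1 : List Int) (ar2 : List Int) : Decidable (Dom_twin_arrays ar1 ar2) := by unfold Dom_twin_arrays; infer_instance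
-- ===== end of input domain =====

-- B replaces A's two hand-rolled min/second-min scans by sorting each array's indices by value (simpler, not faster).

-- ===== PORT A =====
-- loop body of A's two identical scans: state = (min [value, index], second-min [value, index])
def twinStep (ar : List Int) (st : (Int × Int) × (Int × Int)) (i : Int) : (Int × Int) × (Int × Int) :=
  let x := PySem.List.pyGetD ar i 0     -- ar[i]; i ∈ range(2, len ar) is always in range
  if x < st.1.1 then ((x, i), st.1)
  else if x < st.2.1 then (st.1, (x, i))
  else st

def twin_arrays (ar1 : List Int) (ar2 : List Int) : Int :=
  -- ar1[0], ar1[1], ar2[0], ar2[1]: pyGet? = none is Python's IndexError, excluded by Pre_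
  match PySem.List.pyGet? ar1 0, PySem.List.pyGet? ar1 1,
        PySem.List.pyGet? ar2 0, PySem.List.pyGet? ar2 1 with
  | some a0, some a1, some b0, some b1 =>
    let st1i : (Int × Int) × (Int × Int) := if a0 < a1 then ((a0, 0), (a1, 1)) else ((a1, 1), (a0, 0))
    let st2i : (Int × Int) × (Int × Int) := if b0 < b1 then ((b0, 0), (b1, 1)) else ((b1, 1), (b0, 0))
    let st1 := (PySem.List.pyRange 2 (ar1.length : Int) 1).foldl (twinStep ar1) st1i
    let st2 := (PySem.List.pyRange 2 (ar2.length : Int) 1).foldl (twinStep ar2) st2i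
    if st1.1.2 = st2.1.2 then min (st1.2.1 + st2.1.1) (st1.1.1 + st2.2.1)
    else st1.1.1 + st2.1.1
  | _, _, _, _ => 0

-- ===== PORT B =====
def twin_arrays_alt (ar1 : List Int) (ar2 : List Int) : Int :=
  let order1 := PySem.List.sorted (PySem.List.pyRange 0 (ar1.length : Int) 1)
    (fun i => PySem.List.pyGetD ar1 i 0) false
  let order2 := PySem.List.sorted (PySem.List.pyRange 0 (ar2.length : Int) 1)
    (fun j => PySem.List.pyGetD ar2 j 0) false
  -- order1[0], order2[0]: pyGet? = none is Python's IndexError, excluded by Pre_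
  match PySem.List.pyGet? order1 0 with
  | some i1 =>
    match PySem.List.pyGet? order2 0 with
    | some i2 =>
      if i1 ≠ i2 then PySem.List.pyGetD ar1 i1 0 + PySem.List.pyGetD ar2 i2 0
      else
        -- order1[1], order2[1]: only reached when i1 = i2; IndexError excluded by Pre_
        match PySem.List.pyGet? order1 1 with
        | some o1 =>
          match PySem.List.pyGet? order2 1 with
          | some o2 =>
            min (PySem.List.pyGetD ar1 o1 0 + PySem.List.pyGetD ar2 i2 0)
                (PySem.List.pyGetD ar1 i1 0 + PySem.List.pyGetD ar2 o2 0)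
          | none => 0
        | none => 0
    | none => 0
  | none => 0

-- ===== PRECONDITION & SPEC =====
-- A indexes ar1[1] and ar2[1] unconditionally: IndexError unless both lists have length ≥ 2.
def Pre_twin_arrays (ar1 : List Int) (ar2 : List Int) : Prop := 2 ≤ ar1.length ∧ 2 ≤ ar2.length
instance (ar1 : List Int) (ar2 : List Int) : Decidable (Pre_twin_arrays ar1 ar2) := by unfold Pre_twin_arrays; infer_instance
def pvWitness_twin_arrays : List Int × List Int := ([3, 1, 4], [2, 2])

def Spec_twin_arrays (ar1 : List Int) (ar2 : List Int) (out : Int) : Prop := out = twin_arrays_alt ar1 ar2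
instance (ar1 : List Int) (ar2 : List Int) (out : Int) : Decidable (Spec_twin_arrays ar1 ar2 out) := by unfold Spec_twin_arrays; infer_instance

-- ===== CLAIM (what is proved, stated in full; the proofs are below) =====
def Claim_equal_twin_arrays : Prop := ∀ (ar1 : List Int) (ar2 : List Int), Dom_twin_arrays ar1 ar2 → Pre_twin_arrays ar1 ar2 → Spec_twin_arrays ar1 ar2 (twin_arrays ar1 ar2)

-- ===== LEMMAS AND PROOFS =====

-- Invariant of A's scan after the first k elements of ar:
-- st.1 holds a minimum value together with its (Int) index p < k,
-- st.2.1 holds the minimum of the values at indices ≠ p.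
def twinInv (ar : List Int) (k : Nat) (st : (Int × Int) × (Int × Int)) : Prop :=
  ∃ p : Nat, p < k ∧ st.1.2 = (p : Int) ∧ ar.getD p 0 = st.1.1 ∧
    (∀ t : Nat, t < k → st.1.1 ≤ ar.getD t 0) ∧
    (∃ q : Nat, q < k ∧ q ≠ p ∧ ar.getD q 0 = st.2.1) ∧
    (∀ t : Nat, t < k → t ≠ p → st.2.1 ≤ ar.getD t 0)

theorem twinStep_inv (ar : List Int) (st : (Int × Int) × (Int × Int)) (m : Nat)
    (hm : m < ar.length) (h : twinInv ar m st) :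
    twinInv ar (m + 1) (twinStep ar st (m : Int)) := by
  obtain ⟨p, hpk, hidx, hpv, hmin, ⟨q, hqk, hqp, hqv⟩, hsec⟩ := h
  have hx : PySem.List.pyGetD ar (m : Int) 0 = ar.getD m 0 := by
    simp [PySem.List.pyGetD_natCast]
  simp only [twinStep, hx]
  split_ifs with h1 h2
  · refine ⟨m, by omega, rfl, rfl, ?_, ⟨p, by omega, by omega, hpv⟩, ?_⟩
    · intro t ht
      rcases Nat.lt_succ_iff_lt_or_eq.mp ht with ht' | rfl
      · exact le_of_lt (lt_of_lt_of_le h1 (hmin t ht'))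
      · exact le_refl _
    · intro t ht htm
      rcases Nat.lt_succ_iff_lt_or_eq.mp ht with ht' | rfl
      · exact hmin t ht'
      · omega
  · refine ⟨p, by omega, hidx, hpv, ?_, ⟨m, by omega, by omega, rfl⟩, ?_⟩
    · intro t ht
      rcases Nat.lt_succ_iff_lt_or_eq.mp ht with ht' | rfl
      · exact hmin t ht'
      · exact not_lt.mp h1
    · intro t ht htp
      rcases Nat.lt_succ_iff_lt_or_eq.mp ht with ht' | rfl
      · exact le_of_lt (lt_of_lt_of_le h2 (hsec t ht' htp))
      · exact le_refl _
  · refine ⟨p, by omega, hidx, hpv, ?_, ⟨q, by omega, hqp, hqv⟩, ?_⟩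
    · intro t ht
      rcases Nat.lt_succ_iff_lt_or_eq.mp ht with ht' | rfl
      · exact hmin t ht'
      · exact not_lt.mp h1
    · intro t ht htp
      rcases Nat.lt_succ_iff_lt_or_eq.mp ht with ht' | rfl
      · exact hsec t ht' htp
      · exact not_lt.mp h2

theorem twinFold_inv (ar : List Int) (st0 : (Int × Int) × (Int × Int))
    (h0 : twinInv ar 2 st0) :
    ∀ m : Nat, 2 ≤ m → m ≤ ar.length →
      twinInv ar m ((PySem.List.pyRange 2 (m : Int) 1).foldl (twinStep ar) st0) := by
  intro m
  induction m with
  | zero => omega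
  | succ n ih =>
    intro h2 hlen
    by_cases hn : 2 ≤ n
    · have hcast : ((n + 1 : Nat) : Int) = (n : Int) + 1 := by push_cast; ring
      rw [hcast, PySem.List.pyRange_one_succ_right (by exact_mod_cast hn), List.foldl_append]
      simp only [List.foldl_cons, List.foldl_nil]
      exact twinStep_inv ar _ n (by omega) (ih hn (by omega))
    · have hn1 : n = 1 := by omega
      subst hn1
      have hc : ((1 + 1 : Nat) : Int) = 2 := by norm_num
      rw [hc, PySem.List.pyRange_one_eq_nil le_rfl]
      simpa using h0

-- the initial state built from the first two elements satisfies the invariant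
theorem twinInit_inv (a0 a1 : Int) (t : List Int) :
    twinInv (a0 :: a1 :: t) 2
      (if a0 < a1 then ((a0, 0), (a1, 1)) else ((a1, 1), (a0, 0))) := by
  by_cases hab : a0 < a1
  · rw [if_pos hab]
    refine ⟨0, by omega, by simp, rfl, ?_, ⟨1, by omega, by omega, rfl⟩, ?_⟩
    · intro t' ht'
      interval_cases t' <;> simp [le_of_lt hab]
    · intro t' ht' htp
      interval_cases t' <;> simp_all
  · rw [if_neg hab]
    refine ⟨1, by omega, by simp, rfl, ?_, ⟨0, by omega, by omega, rfl⟩, ?_⟩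
    · intro t' ht'
      interval_cases t' <;> simp_all [not_lt.mp hab]
    · intro t' ht' htp
      interval_cases t' <;> simp_all

-- value/second-value characterization shared by both programs: m is the minimum of ar,
-- attained at index p, and s is the minimum over the indices ≠ p
def twinChar (ar : List Int) (m s : Int) (p : Nat) : Prop :=
  p < ar.length ∧ ar.getD p 0 = m ∧ (∀ t, t < ar.length → m ≤ ar.getD t 0) ∧
  (∃ q, q < ar.length ∧ q ≠ p ∧ ar.getD q 0 = s) ∧
  (∀ t, t < ar.length → t ≠ p → s ≤ ar.getD t 0)

-- the final combination both programs perform, as a function of the two characterizations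
def combineVal (m1 s1 : Int) (p1 : Nat) (m2 s2 : Int) (p2 : Nat) : Int :=
  if p1 = p2 then min (s1 + m2) (m1 + s2) else m1 + m2

theorem combine_le (ar1 ar2 : List Int) (m1 s1 : Int) (p1 : Nat) (m2 s2 : Int) (p2 : Nat)
    (h1 : twinChar ar1 m1 s1 p1) (h2 : twinChar ar2 m2 s2 p2)
    (i j : Nat) (hi : i < ar1.length) (hj : j < ar2.length) (hij : i ≠ j) :
    combineVal m1 s1 p1 m2 s2 p2 ≤ ar1.getD i 0 + ar2.getD j 0 := by
  obtain ⟨hp1, hm1, hmin1, ⟨q1, hq1, hqp1, hs1⟩, hsec1⟩ := h1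
  obtain ⟨hp2, hm2, hmin2, ⟨q2, hq2, hqp2, hs2⟩, hsec2⟩ := h2
  unfold combineVal
  by_cases h : p1 = p2
  · rw [if_pos h]
    by_cases hip : i = p1
    · exact le_trans (min_le_right _ _) (add_le_add (hmin1 i hi) (hsec2 j hj (by omega)))
    · exact le_trans (min_le_left _ _) (add_le_add (hsec1 i hi hip) (hmin2 j hj))
  · rw [if_neg h]
    exact add_le_add (hmin1 i hi) (hmin2 j hj)

theorem combine_mem (ar1 ar2 : List Int) (m1 s1 : Int) (p1 : Nat) (m2 s2 : Int) (p2 : Nat)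
    (h1 : twinChar ar1 m1 s1 p1) (h2 : twinChar ar2 m2 s2 p2) :
    ∃ i j : Nat, i < ar1.length ∧ j < ar2.length ∧ i ≠ j ∧
      combineVal m1 s1 p1 m2 s2 p2 = ar1.getD i 0 + ar2.getD j 0 := by
  obtain ⟨hp1, hm1, hmin1, ⟨q1, hq1, hqp1, hs1⟩, hsec1⟩ := h1
  obtain ⟨hp2, hm2, hmin2, ⟨q2, hq2, hqp2, hs2⟩, hsec2⟩ := h2
  unfold combineVal
  by_cases h : p1 = p2
  · rw [if_pos h]
    rcases min_cases (s1 + m2) (m1 + s2) with ⟨heq, _⟩ | ⟨heq, _⟩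
    · exact ⟨q1, p2, hq1, hp2, by omega, by rw [heq, hs1, hm2]⟩
    · exact ⟨p1, q2, hp1, hq2, by omega, by rw [heq, hm1, hs2]⟩
  · rw [if_neg h]
    exact ⟨p1, p2, hp1, hp2, h, by rw [hm1, hm2]⟩

-- the combined value does not depend on which characterization (tie-break) was found
theorem combine_unique (ar1 ar2 : List Int) (m1 s1 : Int) (p1 : Nat) (m2 s2 : Int) (p2 : Nat)
    (n1 u1 : Int) (r1 : Nat) (n2 u2 : Int) (r2 : Nat)
    (hA1 : twinChar ar1 m1 s1 p1) (hA2 : twinChar ar2 m2 s2 p2)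
    (hB1 : twinChar ar1 n1 u1 r1) (hB2 : twinChar ar2 n2 u2 r2) :
    combineVal m1 s1 p1 m2 s2 p2 = combineVal n1 u1 r1 n2 u2 r2 := by
  obtain ⟨i, j, hi, hj, hij, he⟩ := combine_mem ar1 ar2 n1 u1 r1 n2 u2 r2 hB1 hB2
  obtain ⟨i', j', hi', hj', hij', he'⟩ := combine_mem ar1 ar2 m1 s1 p1 m2 s2 p2 hA1 hA2
  apply le_antisymm
  · rw [he]
    exact combine_le ar1 ar2 m1 s1 p1 m2 s2 p2 hA1 hA2 i j hi hj hij
  · rw [he']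
    exact combine_le ar1 ar2 n1 u1 r1 n2 u2 r2 hB1 hB2 i' j' hi' hj' hij'

-- B's sorted index list starts with two distinct indices realizing the characterization
theorem sortChar (ar : List Int) (h2 : 2 ≤ ar.length) :
    ∃ (p q : Nat) (rest : List Int),
      PySem.List.sorted (PySem.List.pyRange 0 (ar.length : Int) 1)
        (fun i => PySem.List.pyGetD ar i 0) false = (p : Int) :: (q : Int) :: rest ∧
      twinChar ar (ar.getD p 0) (ar.getD q 0) p := by
  set key : Int → Int := fun i => PySem.List.pyGetD ar i 0 with hkey
  set L := PySem.List.sorted (PySem.List.pyRange 0 (ar.length : Int) 1) key false with hL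
  have hperm : L.Perm (PySem.List.pyRange 0 (ar.length : Int) 1) := PySem.List.sorted_perm _ _ _
  have hlen : 2 ≤ L.length := by
    rw [hperm.length_eq, PySem.List.length_pyRange_one]
    omega
  have hne : L ≠ [] := by
    intro h
    rw [h] at hlen
    simp at hlen
  obtain ⟨x, L', hE1⟩ := List.exists_cons_of_ne_nil hne
  have hne2 : L' ≠ [] := by
    intro h
    rw [hE1, h] at hlen
    simp at hlen
  obtain ⟨y, rest, hE2⟩ := List.exists_cons_of_ne_nil hne2
  have hEq : L = x :: y :: rest := by rw [hE1, hE2]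
  have hxy : x ≠ y := by
    have hnd : L.Nodup := hperm.nodup_iff.mpr (PySem.List.nodup_pyRange_one 0 (ar.length : Int))
    rw [hEq] at hnd
    exact fun h => (List.nodup_cons.mp hnd).1 (h ▸ List.mem_cons_self)
  have hxR : x ∈ PySem.List.pyRange 0 (ar.length : Int) 1 :=
    hperm.subset (hEq ▸ List.mem_cons_self)
  have hyR : y ∈ PySem.List.pyRange 0 (ar.length : Int) 1 :=
    hperm.subset (hEq ▸ List.mem_cons_of_mem _ List.mem_cons_self)
  rw [PySem.List.mem_pyRange_one] at hxR hyR
  have hx : x = ((x.toNat : Nat) : Int) := (Int.toNat_of_nonneg hxR.1).symm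
  have hy : y = ((y.toNat : Nat) : Int) := (Int.toNat_of_nonneg hyR.1).symm
  have hkt : ∀ t : Nat, key (t : Int) = ar.getD t 0 := by
    intro t
    simp [hkey, PySem.List.pyGetD_natCast]
  have hhead : ∀ z ∈ PySem.List.pyRange 0 (ar.length : Int) 1, key x ≤ key z :=
    PySem.List.key_head_sorted_le _ key (hL.symm.trans hEq)
  have hpw : (x :: y :: rest).Pairwise (fun a b => key a ≤ key b) := by
    have := PySem.List.sorted_pairwise (PySem.List.pyRange 0 (ar.length : Int) 1) key
    rw [← hL, hEq] at this
    exact this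
  refine ⟨x.toNat, y.toNat, rest, by rw [← hx, ← hy, ← hEq, hL], ?_, rfl, ?_, ?_, ?_⟩
  · omega
  · -- x.toNat realizes the minimum
    intro t ht
    have hmem : ((t : Nat) : Int) ∈ PySem.List.pyRange 0 (ar.length : Int) 1 := by
      rw [PySem.List.mem_pyRange_one]
      constructor <;> omega
    have := hhead _ hmem
    rw [hkt t] at this
    rw [hx, hkt] at this
    exact this
  · -- y.toNat realizes the second minimum
    exact ⟨y.toNat, by omega, by omega, rfl⟩
  · intro t ht htp
    have hmem : ((t : Nat) : Int) ∈ L := by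
      rw [hperm.mem_iff, PySem.List.mem_pyRange_one]
      constructor <;> omega
    rw [hEq] at hmem
    have htx : ((t : Nat) : Int) ≠ x := by
      rw [hx]
      intro hc
      exact htp (by exact_mod_cast hc)
    have htail : ((t : Nat) : Int) ∈ y :: rest := by
      rcases List.mem_cons.mp hmem with hc | hc
      · exact absurd hc htx
      · exact hc
    have hpw2 := List.pairwise_cons.mp hpw
    rcases List.mem_cons.mp htail with hc | hc
    · rw [← hc]
      simp
    · have := (List.pairwise_cons.mp hpw2.2).1 _ hc
      rw [hy, hkt] at this
      rw [hkt] at this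
      exact this

-- ===== VERDICT (by name: the statement is the Claim_ definition above) =====
theorem twin_arrays_spec : Claim_equal_twin_arrays := by
  intro ar1 ar2 hdom hpre
  obtain ⟨h1, h2⟩ := hpre
  unfold Spec_twin_arrays
  -- reduce B: expose the two heads of each sorted index list
  obtain ⟨p1', q1', rest1, hS1, hch1'⟩ := sortChar ar1 h1
  obtain ⟨p2', q2', rest2, hS2, hch2'⟩ := sortChar ar2 h2
  have hBred : twin_arrays_alt ar1 ar2 =
      combineVal (ar1.getD p1' 0) (ar1.getD q1' 0) p1' (ar2.getD p2' 0) (ar2.getD q2' 0) p2' := by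
    unfold twin_arrays_alt
    rw [hS1, hS2]
    have g10 : PySem.List.pyGet? ((p1' : Int) :: (q1' : Int) :: rest1) 0 = some (p1' : Int) := by
      simp [pysem]
    have g11 : PySem.List.pyGet? ((p1' : Int) :: (q1' : Int) :: rest1) 1 = some (q1' : Int) := by
      simp [PySem.List.pyGet?, PySem.List.pyIdx?]
    have g20 : PySem.List.pyGet? ((p2' : Int) :: (q2' : Int) :: rest2) 0 = some (p2' : Int) := by
      simp [pysem]
    have g21 : PySem.List.pyGet? ((p2' : Int) :: (q2' : Int) :: rest2) 1 = some (q2' : Int) := by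
      simp [PySem.List.pyGet?, PySem.List.pyIdx?]
    simp only [g10, g11, g20, g21]
    simp only [combineVal]
    by_cases h : p1' = p2'
    · simp [h, PySem.List.pyGetD_natCast]
    · have : (p1' : Int) ≠ (p2' : Int) := by exact_mod_cast h
      simp [h, this, PySem.List.pyGetD_natCast]
  -- reduce A: run the loop invariant
  rcases ar1 with _ | ⟨a0, ar1'⟩
  · simp at h1
  rcases ar1' with _ | ⟨a1, t1⟩
  · simp at h1
  rcases ar2 with _ | ⟨b0, ar2'⟩
  · simp at h2
  rcases ar2' with _ | ⟨b1, t2⟩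
  · simp at h2
  obtain ⟨p1, hp1, hidx1, hpv1, hmin1, hqex1, hsec1⟩ :=
    twinFold_inv (a0 :: a1 :: t1) _ (twinInit_inv a0 a1 t1) (a0 :: a1 :: t1).length (by simp) le_rfl
  obtain ⟨p2, hp2, hidx2, hpv2, hmin2, hqex2, hsec2⟩ :=
    twinFold_inv (b0 :: b1 :: t2) _ (twinInit_inv b0 b1 t2) (b0 :: b1 :: t2).length (by simp) le_rfl
  have e1 : PySem.List.pyGet? (a0 :: a1 :: t1) 0 = some a0 := by simp [pysem]
  have e2 : PySem.List.pyGet? (a0 :: a1 :: t1) 1 = some a1 := by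
    simp [PySem.List.pyGet?, PySem.List.pyIdx?]
  have e3 : PySem.List.pyGet? (b0 :: b1 :: t2) 0 = some b0 := by simp [pysem]
  have e4 : PySem.List.pyGet? (b0 :: b1 :: t2) 1 = some b1 := by
    simp [PySem.List.pyGet?, PySem.List.pyIdx?]
  set st1 := (PySem.List.pyRange 2 ((a0 :: a1 :: t1).length : Int) 1).foldl
    (twinStep (a0 :: a1 :: t1))
    (if a0 < a1 then ((a0, 0), (a1, 1)) else ((a1, 1), (a0, 0))) with hst1
  set st2 := (PySem.List.pyRange 2 ((b0 :: b1 :: t2).length : Int) 1).foldl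
    (twinStep (b0 :: b1 :: t2))
    (if b0 < b1 then ((b0, 0), (b1, 1)) else ((b1, 1), (b0, 0))) with hst2
  have hAred : twin_arrays (a0 :: a1 :: t1) (b0 :: b1 :: t2) =
      combineVal st1.1.1 st1.2.1 p1 st2.1.1 st2.2.1 p2 := by
    have hred : twin_arrays (a0 :: a1 :: t1) (b0 :: b1 :: t2) =
        (if st1.1.2 = st2.1.2 then min (st1.2.1 + st2.1.1) (st1.1.1 + st2.2.1)
         else st1.1.1 + st2.1.1) := by
      unfold twin_arrays
      rw [e1, e2, e3, e4]
    rw [hred, hidx1, hidx2]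
    simp only [combineVal]
    by_cases h : p1 = p2
    · simp [h]
    · have : (p1 : Int) ≠ (p2 : Int) := by exact_mod_cast h
      simp [h, this]
  rw [hAred, hBred]
  exact combine_unique _ _ _ _ _ _ _ _ _ _ _ _ _ _
    ⟨hp1, hpv1, hmin1, hqex1, hsec1⟩ ⟨hp2, hpv2, hmin2, hqex2, hsec2⟩ hch1' hch2'
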